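-- pv_equiv track=rewrite | github.com/jathin-sr/llmProfiler | utils/param_calcs.py | calculate_model_params
-- ===== SOURCE A (Python) =====
-- def calculate_model_params(block_size, n_layer, n_embd):
--     """Calculate approximate parameter count for GPT model"""
--     vocab_size = 65
--
--     # embedding parameters
--     params = vocab_size * n_embd +block_size * n_embd
--
--     # transformer blocks
--     for _ in range(n_layer):
--         # attention projections(Q, K, V, output)
--         params += 4 * n_embd * n_embd
--         # mlp layers
--         params += n_embd * (4 * n_embd) + (4 * n_embd) * n_embd
--         # layer norms(approx)
--         params += 4 * n_embd
--
--     # output projection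
--     params += n_embd * vocab_size
--
--     return params
-- ===== SOURCE B (Python) =====
-- def calculate_model_params(block_size, n_layer, n_embd):
--     """Calculate approximate parameter count for GPT model (closed form)"""
--     vocab_size = 65
--     per_layer = 12 * n_embd * n_embd + 4 * n_embd
--     embeddings = (2 * vocab_size + block_size) * n_embd
--     return embeddings + n_layer * per_layer
-- ===== Notes on version B (the rewrite author's own statement) =====
-- stated objective: faster
-- what changed: Replaces the per-layer loop with a closed-form formula (per-layer cost 12*n_embd^2 + 4*n_embd multiplied by n_layer); Pre_ excludes negative n_layer, a nonsense layer count on which A's range() silently contributes nothing while the plain closed form extrapolates linearly.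
-- outside the precondition, e.g. on calculate_model_params(8, -1, 4): A returns 552, B returns 344
import Mathlib
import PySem

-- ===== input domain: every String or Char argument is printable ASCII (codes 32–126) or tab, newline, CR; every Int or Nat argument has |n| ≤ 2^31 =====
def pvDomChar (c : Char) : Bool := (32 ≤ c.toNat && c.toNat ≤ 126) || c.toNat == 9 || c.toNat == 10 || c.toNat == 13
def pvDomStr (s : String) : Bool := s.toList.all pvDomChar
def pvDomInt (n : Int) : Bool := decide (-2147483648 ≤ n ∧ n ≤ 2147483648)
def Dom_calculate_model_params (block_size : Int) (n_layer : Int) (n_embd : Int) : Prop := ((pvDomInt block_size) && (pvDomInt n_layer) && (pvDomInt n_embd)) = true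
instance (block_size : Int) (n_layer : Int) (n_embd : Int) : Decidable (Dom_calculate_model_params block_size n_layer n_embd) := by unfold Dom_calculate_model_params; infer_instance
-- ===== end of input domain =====

-- B replaces A's per-layer loop by a closed-form formula (O(1) instead of O(n_layer)).

-- ===== PORT A =====
-- Literal port of A: loop over range(n_layer) adding the per-layer terms.
def calculate_model_params (block_size : Int) (n_layer : Int) (n_embd : Int) : Int :=
  let vocab_size : Int := 65
  let params : Int := vocab_size * n_embd + block_size * n_embd
  let params := (PySem.List.pyRange 0 n_layer 1).foldl
    (fun p _ => p + 4 * n_embd * n_embd + (n_embd * (4 * n_embd) + (4 * n_embd) * n_embd) + 4 * n_embd) params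
  params + n_embd * vocab_size

-- ===== PORT B =====
-- B: closed form, per-layer cost times n_layer.
def calculate_model_params_alt (block_size : Int) (n_layer : Int) (n_embd : Int) : Int :=
  let vocab_size : Int := 65
  let per_layer : Int := 12 * n_embd * n_embd + 4 * n_embd
  let embeddings : Int := (2 * vocab_size + block_size) * n_embd
  embeddings + n_layer * per_layer

-- ===== PRECONDITION & SPEC =====
-- Pre_ excludes negative n_layer, a nonsense layer count on which A's range() silently
-- contributes nothing (an accident of the loop) while B's plain closed form extrapolates linearly.
def Pre_calculate_model_params (block_size : Int) (n_layer : Int) (n_embd : Int) : Prop := 0 ≤ n_layer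
instance (block_size : Int) (n_layer : Int) (n_embd : Int) : Decidable (Pre_calculate_model_params block_size n_layer n_embd) := by unfold Pre_calculate_model_params; infer_instance
def pvWitness_calculate_model_params : Int × Int × Int := (8, 2, 4)

def Spec_calculate_model_params (block_size : Int) (n_layer : Int) (n_embd : Int) (out : Int) : Prop := out = calculate_model_params_alt block_size n_layer n_embd
instance (block_size : Int) (n_layer : Int) (n_embd : Int) (out : Int) : Decidable (Spec_calculate_model_params block_size n_layer n_embd out) := by unfold Spec_calculate_model_params; infer_instance

-- ===== CLAIM =====
def Claim_equal_calculate_model_params : Prop := ∀ (block_size : Int) (n_layer : Int) (n_embd : Int), Dom_calculate_model_params block_size n_layer n_embd → Pre_calculate_model_params block_size n_layer n_embd → Spec_calculate_model_params block_size n_layer n_embd (calculate_model_params block_size n_layer n_embd)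

-- ===== LEMMAS AND PROOFS =====
-- The loop adds a constant c each iteration: foldl over a list of length k adds k*c.
lemma foldl_add_const (c : Int) (l : List Int) (p : Int) :
    l.foldl (fun p _ => p + c) p = p + l.length * c := by
  induction l generalizing p with
  | nil => simp
  | cons x xs ih => simp [List.foldl, ih]; ring

-- ===== VERDICT =====
theorem calculate_model_params_spec : Claim_equal_calculate_model_params := by
  intro b n e _ hn
  have hn' : (0:Int) ≤ n := hn
  unfold Spec_calculate_model_params calculate_model_params calculate_model_params_alt
  simp only []
  rw [show (fun (p : Int) (_ : Int) => p + 4 * e * e + (e * (4 * e) + 4 * e * e) + 4 * e) = (fun (p : Int) (_ : Int) => p + (4 * e * e + (e * (4 * e) + 4 * e * e) + 4 * e)) from by funext p x; ring]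
  rw [foldl_add_const]
  have hl : ((PySem.List.pyRange 0 n 1).length : Int) = n := by
    simp [PySem.List.pyRange]
    omega
  rw [hl]; ring
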